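-- pv_equiv track=rewrite | github.com/RickCYD/Deck_synergy | src/simulation/mana_simulator.py | _spend_mana
-- ===== SOURCE A (Python) =====
-- from typing import Dict, List, Optional, Tuple, Set, Iterable
--
-- def _pick_source_for_color(
--     color: str,
--     sources: List[Set[str]],
--     used_indices: Set[int],
--     prefer_exact: bool = False,
-- ) -> Optional[int]:
--     """Pick an unused source index that can produce a given color.
--
--     - If prefer_exact is True, prefer sources that explicitly include the color
--       over flexible ones.
--     - Break ties by choosing the least-flexible source (fewest colors) first.
--     """
--     candidates: List[Tuple[int, Set[str]]] = [
--         (i, s) for i, s in enumerate(sources) if i not in used_indices and (color in s or color == "C")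
--     ]
--     if not candidates:
--         return None
--
--     if prefer_exact and color != "C":
--         exact = [(i, s) for i, s in candidates if color in s]
--         if exact:
--             candidates = exact
--
--     # Choose the least flexible (fewest colors) to preserve flexible ones
--     candidates.sort(key=lambda t: len(t[1]))
--     return candidates[0][0]
--
-- def _pick_any_unused_source(sources: List[Set[str]], used_indices: Set[int]) -> Optional[int]:
--     for i in range(len(sources)):
--         if i not in used_indices:
--             return i
--     return None
--
-- def _spend_mana(sources: List[Set[str]], cost: Dict[str, int]) -> List[Set[str]]:
--     """Return a new list of sources after paying a cost with a greedy strategy."""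
--     remaining = list(sources)
--     used: Set[int] = set()
--
--     # Colored first (W, U, B, R, G)
--     for color in ["W", "U", "B", "R", "G"]:
--         for _ in range(int(cost.get(color, 0) or 0)):
--             idx = _pick_source_for_color(color, remaining, used)
--             if idx is None:
--                 return remaining  # Shouldn't happen if caller ensured can_pay_cost
--             used.add(idx)
--
--     # Explicit colorless 'C'
--     for _ in range(int(cost.get("C", 0) or 0)):
--         idx = _pick_source_for_color("C", remaining, used, prefer_exact=True)
--         if idx is None:
--             idx = _pick_any_unused_source(remaining, used)
--         if idx is None:
--             return remaining
--         used.add(idx)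
--
--     # Generic
--     generic = int(cost.get("generic", 0) or 0)
--     for _ in range(generic):
--         idx = _pick_any_unused_source(remaining, used)
--         if idx is None:
--             break
--         used.add(idx)
--
--     # Remove used sources
--     new_sources = [s for i, s in enumerate(remaining) if i not in used]
--     return new_sources
-- ===== SOURCE B (Python) =====
-- from typing import Dict, List, Set
--
-- def _spend_mana(sources: List[Set[str]], cost: Dict[str, int]) -> List[Set[str]]:
--     """Pay the cost greedily: each queue is sorted once (stable, by flexibility),
--     then consumed with lazy skipping of already-used indices."""
--     n = len(sources)
--     used: Set[int] = set()
--
--     def take(queue, need) -> bool: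
--         # Consume `need` unused indices from `queue` (already in pick order).
--         for i in queue:
--             if need <= 0:
--                 return True
--             if i not in used:
--                 used.add(i)
--                 need -= 1
--         return need <= 0
--
--     for color in ["W", "U", "B", "R", "G"]:
--         need = int(cost.get(color, 0) or 0)
--         if need > 0:
--             queue = sorted((i for i in range(n) if color in sources[i]),
--                            key=lambda i: len(sources[i]))
--             if not take(queue, need):
--                 return list(sources)
--
--     c_need = int(cost.get("C", 0) or 0)
--     if c_need > 0:
--         if not take(sorted(range(n), key=lambda i: len(sources[i])), c_need):
--             return list(sources)
--
--     take(range(n), int(cost.get("generic", 0) or 0))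
--
--     return [s for i, s in enumerate(sources) if i not in used]
-- ===== Notes on version B (the rewrite author's own statement) =====
-- stated objective: alternative
-- what changed: A re-filters and fully re-sorts the remaining candidate sources for every single mana pip; B sorts each color's candidate queue once (stable, by flexibility) and then consumes the queues in one pass, lazily skipping indices that were already used.
import Mathlib
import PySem

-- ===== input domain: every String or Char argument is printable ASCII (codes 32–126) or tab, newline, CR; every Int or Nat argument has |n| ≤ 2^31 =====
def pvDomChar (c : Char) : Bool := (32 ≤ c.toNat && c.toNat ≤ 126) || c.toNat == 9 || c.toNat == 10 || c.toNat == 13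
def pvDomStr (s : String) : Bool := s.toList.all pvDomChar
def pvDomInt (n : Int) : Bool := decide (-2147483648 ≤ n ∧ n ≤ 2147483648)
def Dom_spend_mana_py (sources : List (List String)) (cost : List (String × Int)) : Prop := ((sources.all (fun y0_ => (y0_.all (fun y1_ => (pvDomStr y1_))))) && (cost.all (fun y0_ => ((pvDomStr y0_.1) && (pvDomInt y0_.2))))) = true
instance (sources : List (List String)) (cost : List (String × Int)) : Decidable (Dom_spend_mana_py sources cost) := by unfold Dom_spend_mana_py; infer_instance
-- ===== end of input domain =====

-- B replaces A's per-pip "filter + full sort" source picking with one stable sort per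
-- color queue that is then consumed in a single pass with lazy skipping of used indices
-- (objective: alternative). Return-value equivalence; neither version mutates its arguments.

-- ===== PORT A =====
-- _pick_source_for_color (sets are PySem.Set lists; len/membership are order-independent)
def pickSourceForColorA (color : String) (sources : List (List String))
    (used : PySem.Set Int) (preferExact : Bool) : Option Int :=
  let candidates := (PySem.List.enumerate sources).filter
      (fun p => !(PySem.Set.contains used p.1) && (PySem.Set.contains p.2 color || color == "C"))
  if candidates.isEmpty then none
  else
    let candidates :=
      if preferExact && !(color == "C") then
        let exact := candidates.filter (fun p => PySem.Set.contains p.2 color)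
        if exact.isEmpty then candidates else exact
      else candidates
    some ((PySem.List.sorted candidates (fun t => PySem.Set.len t.2)).headD (0, [])).1

-- _pick_any_unused_source: first index of range(len(sources)) not in used
def pickAnyUnusedA (sources : List (List String)) (used : PySem.Set Int) : Option Int :=
  (PySem.List.pyRange 0 (PySem.List.len sources)).find? (fun i => !(PySem.Set.contains used i))

-- 'for _ in range(count)' loop for one colored pip
def payColorA (color : String) (sources : List (List String)) :
    Nat → PySem.Set Int → Option (PySem.Set Int)
  | 0, used => some used
  | n + 1, used =>
    match pickSourceForColorA color sources used false with
    | none => none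
    | some idx => payColorA color sources n (PySem.Set.add used idx)

-- 'for color in ["W","U","B","R","G"]' with the early return on failure
def payColoredA (sources : List (List String)) (d : PySem.Dict String Int) :
    List String → PySem.Set Int → Option (PySem.Set Int)
  | [], used => some used
  | c :: cs, used =>
    match payColorA c sources (d.getD c 0).toNat used with
    | none => none
    | some used' => payColoredA sources d cs used'

-- the explicit-'C' loop (pick with prefer_exact, then the _pick_any fallback)
def payCA (sources : List (List String)) : Nat → PySem.Set Int → Option (PySem.Set Int)
  | 0, used => some used
  | n + 1, used =>
    match pickSourceForColorA "C" sources used true with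
    | some idx => payCA sources n (PySem.Set.add used idx)
    | none =>
      match pickAnyUnusedA sources used with
      | none => none
      | some idx => payCA sources n (PySem.Set.add used idx)

-- the generic loop ('break' keeps the set built so far)
def genericA (sources : List (List String)) : Nat → PySem.Set Int → PySem.Set Int
  | 0, used => used
  | n + 1, used =>
    match pickAnyUnusedA sources used with
    | none => used
    | some idx => genericA sources n (PySem.Set.add used idx)

-- int(cost.get(k, 0) or 0) = cost.get(k, 0) for int values ('x or 0' is the identity on ints)
def spend_mana_py (sources : List (List String)) (cost : List (String × Int)) : List (List String) :=
  let d := PySem.Dict.ofList cost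
  match payColoredA sources d ["W", "U", "B", "R", "G"] PySem.Set.empty with
  | none => sources
  | some u1 =>
    match payCA sources (d.getD "C" 0).toNat u1 with
    | none => sources
    | some u2 =>
      let u3 := genericA sources (d.getD "generic" 0).toNat u2
      ((PySem.List.enumerate sources).filter (fun p => !(PySem.Set.contains u3 p.1))).map Prod.snd

-- ===== PORT B =====
-- take(queue, need): consume `need` unused indices, lazily skipping used ones
def takeB : List Int → PySem.Set Int → Nat → Bool × PySem.Set Int
  | _, used, 0 => (true, used)
  | [], used, _ + 1 => (false, used)
  | i :: q, used, n + 1 =>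
    if PySem.Set.contains used i then takeB q used (n + 1)
    else takeB q (PySem.Set.add used i) n

-- sorted((i for i in range(n) if color in sources[i]), key=lambda i: len(sources[i]))
def queueForColorB (color : String) (sources : List (List String)) : List Int :=
  PySem.List.sorted
    ((PySem.List.pyRange 0 (PySem.List.len sources)).filter
      (fun i => PySem.Set.contains (PySem.List.pyGetD sources i []) color))
    (fun i => PySem.Set.len (PySem.List.pyGetD sources i []))

-- sorted(range(n), key=lambda i: len(sources[i]))
def queueAllB (sources : List (List String)) : List Int :=
  PySem.List.sorted (PySem.List.pyRange 0 (PySem.List.len sources))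
    (fun i => PySem.Set.len (PySem.List.pyGetD sources i []))

-- the colored for-loop of B
def goColorsB (sources : List (List String)) (d : PySem.Dict String Int) :
    List String → PySem.Set Int → Option (PySem.Set Int)
  | [], used => some used
  | c :: cs, used =>
    let need := d.getD c 0
    if 0 < need then
      let r := takeB (queueForColorB c sources) used need.toNat
      if r.1 then goColorsB sources d cs r.2 else none
    else goColorsB sources d cs used

def spend_mana_py_alt (sources : List (List String)) (cost : List (String × Int)) : List (List String) :=
  let d := PySem.Dict.ofList cost
  match goColorsB sources d ["W", "U", "B", "R", "G"] PySem.Set.empty with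
  | none => sources
  | some u1 =>
    let cneed := d.getD "C" 0
    let r := if 0 < cneed then takeB (queueAllB sources) u1 cneed.toNat else (true, u1)
    if r.1 then
      let u3 := (takeB (PySem.List.pyRange 0 (PySem.List.len sources)) r.2
        (d.getD "generic" 0).toNat).2
      ((PySem.List.enumerate sources).filter (fun p => !(PySem.Set.contains u3 p.1))).map Prod.snd
    else sources

-- ===== PRECONDITION & SPEC =====
def Spec_spend_mana_py (sources : List (List String)) (cost : List (String × Int)) (out : List (List String)) : Prop := out = spend_mana_py_alt sources cost
instance (sources : List (List String)) (cost : List (String × Int)) (out : List (List String)) : Decidable (Spec_spend_mana_py sources cost out) := by unfold Spec_spend_mana_py; infer_instance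

-- ===== CLAIM (what is proved, stated in full; the proofs are below) =====
def Claim_equal_spend_mana_py : Prop := ∀ (sources : List (List String)) (cost : List (String × Int)), Dom_spend_mana_py sources cost → Spec_spend_mana_py sources cost (spend_mana_py sources cost)

-- ===== LEMMAS AND PROOFS =====

-- proof-side abstraction: A's per-pip pick is 'first unused index of a fixed sorted queue'
def payFind (S : List Int) : Nat → PySem.Set Int → Option (PySem.Set Int)
  | 0, u => some u
  | n + 1, u =>
    match S.find? (fun i => !(PySem.Set.contains u i)) with
    | none => none
    | some i => payFind S n (PySem.Set.add u i)

def genFind (S : List Int) : Nat → PySem.Set Int → PySem.Set Int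
  | 0, u => u
  | n + 1, u =>
    match S.find? (fun i => !(PySem.Set.contains u i)) with
    | none => u
    | some i => genFind S n (PySem.Set.add u i)

theorem map_insertBy {α β : Type} (f : α → β) (bef : β → β → Bool) (x : α) (ys : List α) :
    (PySem.List.insertBy (fun a b => bef (f a) (f b)) x ys).map f
      = PySem.List.insertBy bef (f x) (ys.map f) := by
  induction ys with
  | nil => simp [PySem.List.insertBy]
  | cons y ys ih =>
    by_cases h : bef (f x) (f y) <;> simp [PySem.List.insertBy, h, ih]

theorem sorted_map {α β κ : Type} [LinearOrder κ] (f : α → β) (key : β → κ) (l : List α) :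
    (PySem.List.sorted l (fun a => key (f a))).map f = PySem.List.sorted (l.map f) key := by
  rw [PySem.List.sorted_eq_foldl_insertBy, PySem.List.sorted_eq_foldl_insertBy]
  suffices h : ∀ acc : List α,
      (l.foldl (fun acc x =>
          PySem.List.insertBy (fun a b => decide (key (f a) < key (f b))) x acc) acc).map f
        = (l.map f).foldl (fun acc x =>
            PySem.List.insertBy (fun a b => decide (key a < key b)) x acc) (acc.map f) by
    simpa using h []
  induction l with
  | nil => intro acc; rfl
  | cons x l ih =>
    intro acc
    simp only [List.foldl_cons, List.map_cons, ih,
      map_insertBy f (fun a b => decide (key a < key b)) x acc]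

theorem insertBy_head_lt {α κ : Type} [LinearOrder κ] (key : α → κ) (x : α) (zs : List α)
    (h : ∀ z ∈ zs, key x < key z) :
    PySem.List.insertBy (fun a b => decide (key a < key b)) x zs = x :: zs := by
  cases zs with
  | nil => rfl
  | cons z zs => simp [PySem.List.insertBy, h z (by simp)]

theorem filter_insertBy {α κ : Type} [LinearOrder κ] (key : α → κ) (p : α → Bool) (x : α)
    (ys : List α) (hs : ys.Pairwise (fun a b => key a ≤ key b)) :
    (PySem.List.insertBy (fun a b => decide (key a < key b)) x ys).filter p
      = if p x then PySem.List.insertBy (fun a b => decide (key a < key b)) x (ys.filter p)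
        else ys.filter p := by
  induction ys with
  | nil => by_cases hp : p x <;> simp [PySem.List.insertBy, hp]
  | cons y ys ih =>
    have hy : ∀ z ∈ ys, key y ≤ key z := (List.pairwise_cons.1 hs).1
    have hs' : ys.Pairwise (fun a b => key a ≤ key b) := (List.pairwise_cons.1 hs).2
    by_cases hb : key x < key y
    · by_cases hp : p x
      · by_cases hpy : p y
        · simp [PySem.List.insertBy, hb, hp, hpy]
        · have hall : ∀ z ∈ ys.filter p, key x < key z := by
            intro z hz
            exact lt_of_lt_of_le hb (hy z (List.mem_of_mem_filter hz))
          simp [PySem.List.insertBy, hb, hp, hpy, insertBy_head_lt key x _ hall]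
      · by_cases hpy : p y <;>
          · have hall : ∀ z ∈ ys.filter p, key x < key z := by
              intro z hz
              exact lt_of_lt_of_le hb (hy z (List.mem_of_mem_filter hz))
            simp [PySem.List.insertBy, hb, hp, hpy]
    · by_cases hpy : p y
      · simp [PySem.List.insertBy, hb, hpy, ih hs']
        by_cases hp : p x <;> simp [hp]
      · simp [PySem.List.insertBy, hb, hpy, ih hs']

theorem sorted_append_singleton {α κ : Type} [LinearOrder κ] (key : α → κ) (l : List α) (x : α) :
    PySem.List.sorted (l ++ [x]) key
      = PySem.List.insertBy (fun a b => decide (key a < key b)) x (PySem.List.sorted l key) := by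
  rw [PySem.List.sorted_eq_foldl_insertBy, PySem.List.sorted_eq_foldl_insertBy,
    List.foldl_append]
  rfl

theorem filter_sorted {α κ : Type} [LinearOrder κ] (key : α → κ) (p : α → Bool) (l : List α) :
    (PySem.List.sorted l key).filter p = PySem.List.sorted (l.filter p) key := by
  induction l using List.reverseRecOn with
  | nil => rfl
  | append_singleton l x ih =>
    rw [sorted_append_singleton,
      filter_insertBy key p x _ (PySem.List.sorted_pairwise l key), List.filter_append]
    by_cases hp : p x
    · simp [hp, sorted_append_singleton, ih]
    · simp [hp, ih]

theorem pick_tail (cand : List (Int × List String)) :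
    (if cand.isEmpty then none
      else some ((PySem.List.sorted cand (fun t => PySem.Set.len t.2)).headD (0, [])).1)
      = ((PySem.List.sorted cand (fun t => PySem.Set.len t.2)).head?).map Prod.fst := by
  cases cand with
  | nil =>
    rw [(PySem.List.sorted_eq_nil_iff ([] : List (Int × List String))
      (fun t => PySem.Set.len t.2) false).2 rfl]
    rfl
  | cons a t =>
    cases hs : PySem.List.sorted (a :: t) (fun t => PySem.Set.len t.2) with
    | nil => exact absurd ((PySem.List.sorted_eq_nil_iff _ _ _).1 hs) (List.cons_ne_nil a t)
    | cons b r => simp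

theorem pick_colored (c : String) (hC : (c == "C") = false) (sources : List (List String))
    (used : PySem.Set Int) :
    pickSourceForColorA c sources used false
      = (queueForColorB c sources).find? (fun i => !(PySem.Set.contains used i)) := by
  have hqueue : queueForColorB c sources
      = (PySem.List.sorted
          ((PySem.List.enumerate sources).filter (fun p => PySem.Set.contains p.2 c))
          (fun t => PySem.Set.len t.2)).map Prod.fst := by
    rw [PySem.List.enumerate_eq_map_pyRange sources [], List.filter_map,
      ← sorted_map (fun j => (j, PySem.List.pyGetD sources j [])) (fun t => PySem.Set.len t.2),
      List.map_map]
    simp [queueForColorB, Function.comp_def]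
  have hcand : (PySem.List.enumerate sources).filter
        (fun p => !(PySem.Set.contains used p.1) && (PySem.Set.contains p.2 c || c == "C"))
      = ((PySem.List.enumerate sources).filter (fun p => PySem.Set.contains p.2 c)).filter
          (fun p => !(PySem.Set.contains used p.1)) := by
    rw [List.filter_filter]
    simp [hC]
  rw [hqueue, List.find?_map,
    show ((fun i => !(PySem.Set.contains used i)) ∘ Prod.fst)
      = (fun p : Int × List String => !(PySem.Set.contains used p.1)) from rfl,
    ← List.head?_filter, filter_sorted]
  simp only [pickSourceForColorA, hcand, Bool.false_and, Bool.false_eq_true, if_false]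
  exact pick_tail _

theorem pick_C (sources : List (List String)) (used : PySem.Set Int) :
    pickSourceForColorA "C" sources used true
      = (queueAllB sources).find? (fun i => !(PySem.Set.contains used i)) := by
  have hqueue : queueAllB sources
      = (PySem.List.sorted (PySem.List.enumerate sources)
          (fun t => PySem.Set.len t.2)).map Prod.fst := by
    rw [PySem.List.enumerate_eq_map_pyRange sources [],
      ← sorted_map (fun j => (j, PySem.List.pyGetD sources j [])) (fun t => PySem.Set.len t.2),
      List.map_map]
    simp [queueAllB, Function.comp_def]
  have hcand : (PySem.List.enumerate sources).filter
        (fun p => !(PySem.Set.contains used p.1) && (PySem.Set.contains p.2 "C" || "C" == "C"))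
      = (PySem.List.enumerate sources).filter (fun p => !(PySem.Set.contains used p.1)) := by
    simp
  rw [hqueue, List.find?_map,
    show ((fun i => !(PySem.Set.contains used i)) ∘ Prod.fst)
      = (fun p : Int × List String => !(PySem.Set.contains used p.1)) from rfl,
    ← List.head?_filter, filter_sorted]
  simp only [pickSourceForColorA, hcand]
  exact pick_tail _

theorem pickAny_none_of_pickC_none (sources : List (List String)) (used : PySem.Set Int)
    (h : (queueAllB sources).find? (fun i => !(PySem.Set.contains used i)) = none) :
    pickAnyUnusedA sources used = none := by
  rw [List.find?_eq_none] at h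
  unfold pickAnyUnusedA
  rw [List.find?_eq_none]
  intro x hx
  exact h x (((PySem.List.sorted_perm _ _ _).mem_iff).2 hx)

theorem contains_add_of_contains (u : PySem.Set Int) (i j : Int)
    (h : PySem.Set.contains u i = true) : PySem.Set.contains (PySem.Set.add u j) i = true := by
  rw [PySem.Set.contains_iff] at h ⊢
  exact (PySem.Set.mem_add u j i).2 (Or.inl h)

theorem payFind_cons_of_mem (i : Int) (q : List Int) (u : PySem.Set Int)
    (h : PySem.Set.contains u i = true) (n : Nat) :
    payFind (i :: q) n u = payFind q n u := by
  induction n generalizing u with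
  | zero => rfl
  | succ n ih =>
    have hfind : List.find? (fun j => !(PySem.Set.contains u j)) (i :: q)
        = List.find? (fun j => !(PySem.Set.contains u j)) q := by
      rw [List.find?_cons_of_neg]
      simp [(PySem.Set.contains_iff u i).1 h]
    simp only [payFind, hfind]
    cases hf : q.find? (fun j => !(PySem.Set.contains u j)) with
    | none => rfl
    | some j => exact ih _ (contains_add_of_contains u i j h)

theorem takeB_eq_payFind (q : List Int) (u : PySem.Set Int) (n : Nat) :
    (if (takeB q u n).1 then some (takeB q u n).2 else none) = payFind q n u := by
  induction q generalizing u n with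
  | nil => cases n <;> simp [takeB, payFind]
  | cons i q ih =>
    cases n with
    | zero => simp [takeB, payFind]
    | succ n =>
      by_cases hm : i ∈ u
      · have hc : PySem.Set.contains u i = true := (PySem.Set.contains_iff u i).2 hm
        rw [payFind_cons_of_mem i q u hc]
        simpa [takeB, hm] using ih u (n + 1)
      · have hc' : PySem.Set.contains u i = false := by
          by_contra hx
          exact hm ((PySem.Set.contains_iff u i).1 (by simpa using hx))
        have h1 : payFind (i :: q) (n + 1) u = payFind (i :: q) n (PySem.Set.add u i) := by
          have hfind : List.find? (fun j => !(PySem.Set.contains u j)) (i :: q) = some i := by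
            rw [List.find?_cons_of_pos]; simpa using hm
          simp only [payFind, hfind]
        rw [h1, payFind_cons_of_mem i q _ (by
          rw [PySem.Set.contains_iff]; exact (PySem.Set.mem_add u i i).2 (Or.inr rfl))]
        simpa [takeB, hm] using ih (PySem.Set.add u i) n

theorem genFind_cons_of_mem (i : Int) (q : List Int) (u : PySem.Set Int)
    (h : PySem.Set.contains u i = true) (n : Nat) :
    genFind (i :: q) n u = genFind q n u := by
  induction n generalizing u with
  | zero => rfl
  | succ n ih =>
    have hfind : List.find? (fun j => !(PySem.Set.contains u j)) (i :: q)
        = List.find? (fun j => !(PySem.Set.contains u j)) q := by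
      rw [List.find?_cons_of_neg]
      simp [(PySem.Set.contains_iff u i).1 h]
    simp only [genFind, hfind]
    cases hf : q.find? (fun j => !(PySem.Set.contains u j)) with
    | none => rfl
    | some j => exact ih _ (contains_add_of_contains u i j h)

theorem takeB_snd_eq_genFind (q : List Int) (u : PySem.Set Int) (n : Nat) :
    (takeB q u n).2 = genFind q n u := by
  induction q generalizing u n with
  | nil => cases n <;> simp [takeB, genFind]
  | cons i q ih =>
    cases n with
    | zero => simp [takeB, genFind]
    | succ n =>
      by_cases hm : i ∈ u
      · have hc : PySem.Set.contains u i = true := (PySem.Set.contains_iff u i).2 hm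
        rw [genFind_cons_of_mem i q u hc]
        simpa [takeB, hm] using ih u (n + 1)
      · have hc' : PySem.Set.contains u i = false := by
          by_contra hx
          exact hm ((PySem.Set.contains_iff u i).1 (by simpa using hx))
        have h1 : genFind (i :: q) (n + 1) u = genFind (i :: q) n (PySem.Set.add u i) := by
          have hfind : List.find? (fun j => !(PySem.Set.contains u j)) (i :: q) = some i := by
            rw [List.find?_cons_of_pos]; simpa using hm
          simp only [genFind, hfind]
        rw [h1, genFind_cons_of_mem i q _ (by
          rw [PySem.Set.contains_iff]; exact (PySem.Set.mem_add u i i).2 (Or.inr rfl))]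
        simpa [takeB, hm] using ih (PySem.Set.add u i) n

theorem payColorA_eq (c : String) (hC : (c == "C") = false) (sources : List (List String))
    (n : Nat) (u : PySem.Set Int) :
    payColorA c sources n u = payFind (queueForColorB c sources) n u := by
  induction n generalizing u with
  | zero => rfl
  | succ n ih =>
    simp only [payColorA, payFind, pick_colored c hC]
    cases (queueForColorB c sources).find? (fun i => !(PySem.Set.contains u i)) with
    | none => rfl
    | some i => exact ih _

theorem payCA_eq (sources : List (List String)) (n : Nat) (u : PySem.Set Int) :
    payCA sources n u = payFind (queueAllB sources) n u := by
  induction n generalizing u with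
  | zero => rfl
  | succ n ih =>
    simp only [payCA, payFind, pick_C]
    cases hf : (queueAllB sources).find? (fun i => !(PySem.Set.contains u i)) with
    | none => simp [pickAny_none_of_pickC_none sources u hf]
    | some i => exact ih _

theorem genericA_eq (sources : List (List String)) (n : Nat) (u : PySem.Set Int) :
    genericA sources n u = genFind (PySem.List.pyRange 0 (PySem.List.len sources)) n u := by
  induction n generalizing u with
  | zero => rfl
  | succ n ih =>
    simp only [genericA, genFind, pickAnyUnusedA]
    cases (PySem.List.pyRange 0 (PySem.List.len sources)).find?
        (fun i => !(PySem.Set.contains u i)) with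
    | none => rfl
    | some i => exact ih _

theorem payColored_eq (sources : List (List String)) (d : PySem.Dict String Int)
    (cs : List String) (hcs : ∀ c ∈ cs, (c == "C") = false) (u : PySem.Set Int) :
    payColoredA sources d cs u = goColorsB sources d cs u := by
  induction cs generalizing u with
  | nil => rfl
  | cons c cs ih =>
    have hc : (c == "C") = false := hcs c (by simp)
    simp only [payColoredA, goColorsB, payColorA_eq c hc,
      ← takeB_eq_payFind (queueForColorB c sources) u (d.getD c 0).toNat]
    by_cases hn : 0 < d.getD c 0
    · simp only [hn, if_true]
      cases ht : (takeB (queueForColorB c sources) u (d.getD c 0).toNat).1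
      · rfl
      · simp [ih (fun x hx => hcs x (by simp [hx]))]
    · have h0 : (d.getD c 0).toNat = 0 := by omega
      simp [hn, h0, takeB, ih (fun x hx => hcs x (by simp [hx]))]

-- ===== VERDICT (by name: the statement is the Claim_ definition above) =====
theorem spend_mana_py_spec : Claim_equal_spend_mana_py := by
  intro sources cost _
  unfold Spec_spend_mana_py
  simp only [spend_mana_py, spend_mana_py_alt]
  rw [payColored_eq sources (PySem.Dict.ofList cost) ["W", "U", "B", "R", "G"] (by decide)]
  cases hg : goColorsB sources (PySem.Dict.ofList cost) ["W", "U", "B", "R", "G"]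
      PySem.Set.empty with
  | none => rfl
  | some u1 =>
    dsimp only
    rw [payCA_eq]
    by_cases hcpos : 0 < (PySem.Dict.ofList cost).getD "C" 0
    · rw [← takeB_eq_payFind (queueAllB sources) u1 ((PySem.Dict.ofList cost).getD "C" 0).toNat]
      simp only [hcpos, if_true]
      cases ht : (takeB (queueAllB sources) u1 ((PySem.Dict.ofList cost).getD "C" 0).toNat).1 with
      | false => rfl
      | true =>
        simp only [if_true]
        rw [genericA_eq, ← takeB_snd_eq_genFind]
    · have h0 : ((PySem.Dict.ofList cost).getD "C" 0).toNat = 0 := by omega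
      rw [h0]
      simp only [payFind, hcpos, if_false]
      rw [genericA_eq, ← takeB_snd_eq_genFind]
      simp
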